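-- pv_equiv track=rewrite | github.com/jahirulislammolla/CodeFights | Challenges/reverseOddCount.py | reverseOddCount
-- ===== SOURCE A (Python) =====
-- def reverseOddCount(st):
--     x={}
--     y=[]
--     l=len(st)-1
--     for i in st:
--         try:
--             x[i]+=1
--         except:
--             x[i]=1
--         y+=[""]
--     for i in range(len(st)):
--         if x[st[i]]%2==0:
--             y[i]=st[i]
--         else:
--             while x[st[l]]%2==0:
--                 l-=1
--             y[l]=st[i]
--             l-=1
--     return ''.join(y)
-- ===== SOURCE B (Python) =====
-- def reverseOddCount(st):
--     cnt = {}
--     for ch in st: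
--         cnt[ch] = cnt.get(ch, 0) + 1
--     odd_pos = [i for i in range(len(st)) if cnt[st[i]] % 2 == 1]
--     odd_chars = [st[i] for i in odd_pos]
--     res = list(st)
--     for pos, ch in zip(odd_pos, reversed(odd_chars)):
--         res[pos] = ch
--     return ''.join(res)
-- ===== Notes on version B (the rewrite author's own statement) =====
-- stated objective: simpler
-- what changed: Replaces A's interleaved two-pointer fill (inner while-scan hunting the next odd-count slot from the right) with an explicit collect-reverse-scatter: list the odd-count positions once, write the reversed odd characters back onto those positions in a copy of the string.
import Mathlib
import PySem

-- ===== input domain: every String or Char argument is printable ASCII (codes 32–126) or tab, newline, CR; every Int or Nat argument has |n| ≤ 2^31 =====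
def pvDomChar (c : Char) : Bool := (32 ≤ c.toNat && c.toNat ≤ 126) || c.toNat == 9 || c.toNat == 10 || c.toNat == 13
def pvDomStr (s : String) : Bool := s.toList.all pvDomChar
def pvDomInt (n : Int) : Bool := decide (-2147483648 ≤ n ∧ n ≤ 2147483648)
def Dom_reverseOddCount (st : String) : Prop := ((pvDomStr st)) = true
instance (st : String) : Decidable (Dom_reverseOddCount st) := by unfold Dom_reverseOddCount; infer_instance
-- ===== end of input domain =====

-- B replaces A's interleaved two-pointer fill (inner while-scan for the next odd-count slot
-- from the right) with an explicit collect-reverse-scatter over the odd-count positions; objective: simpler.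

-- ===== PORT A =====
-- the 'while x[st[l]]%2==0: l-=1' inner loop; st[l] ported via pyGet? (none = IndexError, then Python
-- would raise; the loop stops there, which is unreachable in A's actual runs, proved in the lemmas below)
def roFindOdd (cs : List Char) (x : PySem.Dict Char Int) (l : Int) : Int :=
  match h : PySem.List.pyGet? cs l with
  | none => l
  | some c =>
    if PySem.Int.mod (x.getD c 0) 2 == 0 then roFindOdd cs x (l - 1) else l
termination_by (l + cs.length + 1).toNat
decreasing_by
  have hin : PySem.Raise.InRange cs.length l := by
    by_contra hc
    rw [← PySem.List.pyGet?_eq_none_iff] at hc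
    simp [hc] at h
  simp [PySem.Raise.InRange] at hin
  omega

def reverseOddCount (st : String) : String :=
  let cs := st.toList
  -- first loop: build the counter x and y = [""] * len(st)
  let p0 := cs.foldl (fun (p : PySem.Dict Char Int × List String) c =>
    (p.1.insert c (p.1.getD c 0 + 1), p.2 ++ [""])) (PySem.Dict.empty, [])
  -- second loop over range(len(st)) with state (y, l)
  let q := (List.range cs.length).foldl (fun (q : List String × Int) (i : Nat) =>
    let c := PySem.List.pyGetD cs (i : Int) ' '
    if PySem.Int.mod (p0.1.getD c 0) 2 == 0 then
      (PySem.List.pySetD q.1 (i : Int) (String.ofList [c]), q.2)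
    else
      let l := roFindOdd cs p0.1 q.2
      (PySem.List.pySetD q.1 l (String.ofList [c]), l - 1))
    (p0.2, (cs.length : Int) - 1)
  PySem.Str.join "" q.1

-- ===== PORT B =====
def reverseOddCount_alt (st : String) : String :=
  let cs := st.toList
  let cnt := cs.foldl (fun (d : PySem.Dict Char Int) ch => d.insert ch (d.getD ch 0 + 1)) PySem.Dict.empty
  let oddPos := (List.range cs.length).filter
    (fun (i : Nat) => PySem.Int.mod (cnt.getD (PySem.List.pyGetD cs (i : Int) ' ') 0) 2 == 1)
  let oddChars := oddPos.map (fun (i : Nat) => PySem.List.pyGetD cs (i : Int) ' ')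
  let res := (oddPos.zip oddChars.reverse).foldl
    (fun r pc => PySem.List.pySetD r (pc.1 : Int) pc.2) cs
  String.ofList res

-- ===== PRECONDITION & SPEC =====
def Spec_reverseOddCount (st : String) (out : String) : Prop := out = reverseOddCount_alt st
instance (st : String) (out : String) : Decidable (Spec_reverseOddCount st out) := by unfold Spec_reverseOddCount; infer_instance

-- ===== CLAIM (what is proved, stated in full; the proofs are below) =====
def Claim_equal_reverseOddCount : Prop := ∀ (st : String), Dom_reverseOddCount st → Spec_reverseOddCount st (reverseOddCount st)

-- ===== LEMMAS AND PROOFS =====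

-- `c` has odd multiplicity in cs
def oddb (cs : List Char) (c : Char) : Bool := cs.count c % 2 == 1
-- the positions whose character has odd multiplicity, in increasing order
def oddPosL (cs : List Char) : List Nat :=
  (List.range cs.length).filter (fun i => oddb cs (cs.getD i ' '))
-- number of odd positions strictly below i
def kcn (cs : List Char) (i : Nat) : Nat := (oddPosL cs).countP (fun t => decide (t < i))
-- A's pointer l after the first i iterations
def stateL (cs : List Char) (i : Nat) : Int :=
  if kcn cs i = 0 then (cs.length : Int) - 1
  else ((oddPosL cs).getD ((oddPosL cs).length - kcn cs i) 0 : Int) - 1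
-- A's cell y[j] after the first i iterations
def stateVal (cs : List Char) (i : Nat) (j : Nat) : String :=
  if oddb cs (cs.getD j ' ') then
    (if (oddPosL cs).length - kcn cs i ≤ (oddPosL cs).idxOf j then
      String.ofList [cs.getD ((oddPosL cs).getD ((oddPosL cs).length - 1 - (oddPosL cs).idxOf j) 0) ' ']
     else "")
  else (if j < i then String.ofList [cs.getD j ' '] else "")
-- the common result, as a character list
def roTarget (cs : List Char) : List Char :=
  (List.range cs.length).map (fun j =>
    if oddb cs (cs.getD j ' ') then
      cs.getD ((oddPosL cs).getD ((oddPosL cs).length - 1 - (oddPosL cs).idxOf j) 0) ' '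
    else cs.getD j ' ')

lemma counter_getD (cs : List Char) (c : Char) :
    (cs.foldl (fun (d : PySem.Dict Char Int) ch => d.insert ch (d.getD ch 0 + 1)) PySem.Dict.empty).getD c 0
      = (cs.count c : Int) := by
  rw [PySem.Dict.getD_foldl_insert_add_one]
  simp [PySem.Dict.getD, PySem.Dict.empty, PySem.Dict.get?]

lemma mod2_cast_eq_zero (m : Nat) :
    (PySem.Int.mod (m : Int) 2 == 0) = !(m % 2 == 1) := by
  have h : PySem.Int.mod (m : Int) ((2:Nat):Int) = ((m % 2 : Nat) : Int) := PySem.Int.mod_natCast m 2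
  rw [show ((2:Nat):Int) = 2 from rfl] at h
  rw [h]
  rcases Nat.mod_two_eq_zero_or_one m with h2 | h2 <;> simp [h2]

lemma mod2_cast_eq_one (m : Nat) :
    (PySem.Int.mod (m : Int) 2 == 1) = (m % 2 == 1) := by
  have h : PySem.Int.mod (m : Int) ((2:Nat):Int) = ((m % 2 : Nat) : Int) := PySem.Int.mod_natCast m 2
  rw [show ((2:Nat):Int) = 2 from rfl] at h
  rw [h]
  rcases Nat.mod_two_eq_zero_or_one m with h2 | h2 <;> simp [h2]

lemma oddPosL_pairwise (cs : List Char) : (oddPosL cs).Pairwise (· < ·) := by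
  exact (List.pairwise_lt_range).filter _

lemma oddPosL_nodup (cs : List Char) : (oddPosL cs).Nodup := by
  exact ((List.pairwise_lt_range).filter _).imp (fun h => Nat.ne_of_lt h)

lemma mem_oddPosL (cs : List Char) (j : Nat) :
    j ∈ oddPosL cs ↔ j < cs.length ∧ oddb cs (cs.getD j ' ') = true := by
  simp [oddPosL]

-- rank of a member of a strictly increasing list = number of smaller elements
lemma sorted_idxOf_countP (P : List Nat) (h : P.Pairwise (· < ·)) (i : Nat) (hi : i ∈ P) :
    P.idxOf i = P.countP (fun t => decide (t < i)) := by
  induction P with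
  | nil => simp at hi
  | cons a T ih =>
    rcases List.pairwise_cons.mp h with ⟨ha, hT⟩
    by_cases hai : a = i
    · subst hai
      have h0 : T.countP (fun t => decide (t < a)) = 0 := by
        rw [List.countP_eq_zero]
        intro t htT
        have := ha t htT
        simp only [decide_eq_true_eq]
        omega
      simp [h0]
    · have hiT : i ∈ T := by rcases List.mem_cons.mp hi with h1 | h1; exact absurd h1.symm hai; exact h1
      have hlt : a < i := ha i hiT
      rw [List.countP_cons, List.idxOf_cons_ne _ hai, ih hT hiT]
      simp [hlt]

lemma countP_lt_succ (P : List Nat) (i : Nat) :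
    P.countP (fun t => decide (t < i + 1)) = P.countP (fun t => decide (t < i)) + P.count i := by
  induction P with
  | nil => simp
  | cons a T ih =>
    simp only [List.countP_cons, List.count_cons, ih]
    by_cases h1 : a < i + 1 <;> by_cases h2 : a < i <;> by_cases h3 : a = i <;> simp [h1, h2, h3] <;> omega

lemma getD_set (l : List String) (p j : Nat) (v : String) (hp : p < l.length) :
    (l.set p v).getD j "" = if j = p then v else l.getD j "" := by
  by_cases h : j = p
  · subst h; simp [List.getD_eq_getElem?_getD, hp]
  · rw [List.getD_eq_getElem?_getD, List.getD_eq_getElem?_getD, List.getElem?_set_ne (by omega)]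
    simp [h]

lemma getD_set_char (l : List Char) (p j : Nat) (v : Char) (hp : p < l.length) :
    (l.set p v).getD j ' ' = if j = p then v else l.getD j ' ' := by
  by_cases h : j = p
  · subst h; simp [List.getD_eq_getElem?_getD, hp]
  · rw [List.getD_eq_getElem?_getD, List.getD_eq_getElem?_getD, List.getElem?_set_ne (by omega)]
    simp [h]

lemma pyGet?_of_range (cs : List Char) (k : Nat) (hk : k < cs.length) :
    PySem.List.pyGet? cs (k : Int) = some (cs.getD k ' ') := by
  simp [PySem.List.pyGet?, PySem.List.pyIdx?, hk, List.getD_eq_getElem?_getD]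

lemma evenTest (cs : List Char) (c : Char) :
    (PySem.Int.mod ((cs.count c : Nat) : Int) 2 == 0) = !(oddb cs c) := by
  rw [mod2_cast_eq_zero]; rfl

-- the inner while loop finds t: the first index ≤ l0 whose character has odd multiplicity
lemma roFindOdd_eq (cs : List Char) (x : PySem.Dict Char Int)
    (hx : ∀ c, x.getD c 0 = (cs.count c : Int))
    (t : Nat) (l0 : Int) (ht : t < cs.length) (hodd : oddb cs (cs.getD t ' ') = true)
    (hle : (t : Int) ≤ l0) (hlt : l0 < cs.length)
    (hmid : ∀ j : Nat, t < j → (j : Int) ≤ l0 → oddb cs (cs.getD j ' ') = false) :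
    roFindOdd cs x l0 = (t : Int) := by
  have hl0 : l0 = ((l0.toNat : Nat) : Int) := by omega
  have hrange : l0.toNat < cs.length := by omega
  induction hd : (l0 - t).toNat generalizing l0 with
  | zero =>
    have heq : l0 = (t : Int) := by omega
    subst heq
    rw [roFindOdd, pyGet?_of_range cs t ht]
    simp only [hx, evenTest, hodd]
    simp
  | succ d ih =>
    rw [roFindOdd, hl0, pyGet?_of_range cs l0.toNat hrange, ← hl0]
    have htlt : t < l0.toNat := by omega
    have heven := hmid l0.toNat htlt (by omega)
    simp only [hx, evenTest, heven, Bool.not_false, if_true]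
    exact ih (l0 - 1) (by omega) (by omega) (fun j hj1 hj2 => hmid j hj1 (by omega)) (by omega) (by omega) (by omega)

-- invariant of A's main loop
lemma A_loop (cs : List Char) (x : PySem.Dict Char Int)
    (hx : ∀ c, x.getD c 0 = (cs.count c : Int)) (i : Nat) (hi : i ≤ cs.length)
    (S : List String × Int)
    (hS : S = (List.range i).foldl (fun (q : List String × Int) (j : Nat) =>
      let c := PySem.List.pyGetD cs (j : Int) ' '
      if PySem.Int.mod (x.getD c 0) 2 == 0 then
        (PySem.List.pySetD q.1 (j : Int) (String.ofList [c]), q.2)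
      else
        let l := roFindOdd cs x q.2
        (PySem.List.pySetD q.1 l (String.ofList [c]), l - 1))
      (List.replicate cs.length "", (cs.length : Int) - 1)) :
    S.1.length = cs.length ∧ S.2 = stateL cs i ∧
      ∀ j, j < cs.length → S.1.getD j "" = stateVal cs i j := by
  induction i generalizing S with
  | zero =>
    rw [List.range_zero, List.foldl_nil] at hS
    subst hS
    refine ⟨by simp, by simp [stateL, kcn], ?_⟩
    intro j hj
    have hrep : (List.replicate cs.length "").getD j "" = "" := by
      simp [List.getD_eq_getElem?_getD, hj]
    rw [hrep]
    unfold stateVal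
    by_cases ho : oddb cs (cs.getD j ' ')
    · have hmem : j ∈ oddPosL cs := (mem_oddPosL cs j).mpr ⟨hj, ho⟩
      have hidx : (oddPosL cs).idxOf j < (oddPosL cs).length := List.idxOf_lt_length_of_mem hmem
      have hk0 : kcn cs 0 = 0 := by simp [kcn]
      rw [if_pos ho, if_neg (by omega)]
    · rw [if_neg ho, if_neg (by omega)]
  | succ i ih =>
    have hin : i < cs.length := hi
    obtain ⟨hlen, hl, hval⟩ := ih (by omega) _ rfl
    rw [List.range_succ, List.foldl_append, List.foldl_cons, List.foldl_nil] at hS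
    set T := (List.range i).foldl (fun (q : List String × Int) (j : Nat) =>
      let c := PySem.List.pyGetD cs (j : Int) ' '
      if PySem.Int.mod (x.getD c 0) 2 == 0 then
        (PySem.List.pySetD q.1 (j : Int) (String.ofList [c]), q.2)
      else
        let l := roFindOdd cs x q.2
        (PySem.List.pySetD q.1 l (String.ofList [c]), l - 1))
      (List.replicate cs.length "", (cs.length : Int) - 1) with hT
    rw [show PySem.List.pyGetD cs ((i : Nat) : Int) ' ' = cs.getD i ' ' from by
      simp [PySem.List.pyGetD_natCast]] at hS
    by_cases ho : oddb cs (cs.getD i ' ')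
    -- even-count character: y[i] = st[i], l unchanged
    case neg =>
      rw [Bool.not_eq_true] at ho
      have htest : (PySem.Int.mod (x.getD (cs.getD i ' ') 0) 2 == 0) = true := by
        rw [hx, evenTest, ho]; rfl
      simp only [htest, if_true] at hS
      have hnm : i ∉ oddPosL cs := by
        intro hm
        have h2 := ((mem_oddPosL cs i).mp hm).2
        rw [h2] at ho
        exact Bool.noConfusion ho
      have kk : kcn cs (i + 1) = kcn cs i := by
        unfold kcn
        rw [countP_lt_succ, List.count_eq_zero_of_not_mem hnm]
        omega
      have hset : S.1 = T.1.set i (String.ofList [cs.getD i ' ']) := by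
        rw [hS]; simp [PySem.List.pySetD_natCast]
      refine ⟨by rw [hset]; simp [hlen], ?_, ?_⟩
      · have hS2 : S.2 = T.2 := by rw [hS]
        rw [hS2, hl]
        unfold stateL
        rw [kk]
      · intro j hj
        rw [hset, getD_set T.1 i j _ (by rw [hlen]; omega)]
        by_cases hji : j = i
        · subst hji
          rw [if_pos rfl]
          unfold stateVal
          rw [if_neg (by rw [ho]; simp), if_pos (by omega)]
        · rw [if_neg hji, hval j hj]
          unfold stateVal
          rw [kk]
          by_cases hoj : oddb cs (cs.getD j ' ')
          · rw [if_pos hoj, if_pos hoj]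
          · rw [if_neg hoj, if_neg hoj]
            simp [show (j < i + 1) ↔ (j < i) from by omega]
    -- odd-count character: y[l'] = st[i] where l' scans down to the deepest unused odd slot
    case pos =>
      have htest : (PySem.Int.mod (x.getD (cs.getD i ' ') 0) 2 == 0) = false := by
        rw [hx, evenTest, ho]; rfl
      simp only [htest, Bool.false_eq_true, if_false] at hS
      have hmem : i ∈ oddPosL cs := (mem_oddPosL cs i).mpr ⟨hin, ho⟩
      have hki : (oddPosL cs).idxOf i = kcn cs i :=
        sorted_idxOf_countP (oddPosL cs) (oddPosL_pairwise cs) i hmem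
      have hkm : kcn cs i < (oddPosL cs).length := hki ▸ List.idxOf_lt_length_of_mem hmem
      have htlt : (oddPosL cs).length - 1 - kcn cs i < (oddPosL cs).length := by omega
      have hmono : ∀ (a b : Nat) (ha : a < (oddPosL cs).length) (hb : b < (oddPosL cs).length),
          a < b → (oddPosL cs)[a] < (oddPosL cs)[b] :=
        fun a b ha hb hab => List.pairwise_iff_getElem.mp (oddPosL_pairwise cs) a b ha hb hab
      have hallP : ∀ q ∈ oddPosL cs, q < cs.length := fun q hq => ((mem_oddPosL cs q).mp hq).1
      set t := (oddPosL cs).getD ((oddPosL cs).length - 1 - kcn cs i) 0 with ht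
      have htg : t = (oddPosL cs)[(oddPosL cs).length - 1 - kcn cs i]'htlt :=
        List.getD_eq_getElem _ 0 htlt
      have htP : t ∈ oddPosL cs := htg ▸ List.getElem_mem _
      have htn : t < cs.length := hallP t htP
      have hot : oddb cs (cs.getD t ' ') = true := ((mem_oddPosL cs t).mp htP).2
      have hsl_lt : stateL cs i < cs.length := by
        unfold stateL
        by_cases hk0 : kcn cs i = 0
        · rw [if_pos hk0]; omega
        · rw [if_neg hk0]
          have hmk : (oddPosL cs).length - kcn cs i < (oddPosL cs).length := by omega
          have hb := hallP _ (List.getElem_mem hmk)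
          rw [List.getD_eq_getElem _ 0 hmk]
          omega
      have hsl_ge : (t : Int) ≤ stateL cs i := by
        unfold stateL
        by_cases hk0 : kcn cs i = 0
        · rw [if_pos hk0]; omega
        · rw [if_neg hk0]
          have hmk : (oddPosL cs).length - kcn cs i < (oddPosL cs).length := by omega
          have hb : t < (oddPosL cs)[(oddPosL cs).length - kcn cs i]'hmk :=
            htg ▸ hmono _ _ htlt hmk (by omega)
          rw [List.getD_eq_getElem _ 0 hmk]
          omega
      have hmid : ∀ j : Nat, t < j → (j : Int) ≤ stateL cs i → oddb cs (cs.getD j ' ') = false := by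
        intro j hj1 hj2
        by_contra hc
        rw [Bool.not_eq_false] at hc
        have hjn : j < cs.length := by omega
        have hjP : j ∈ oddPosL cs := (mem_oddPosL cs j).mpr ⟨hjn, hc⟩
        obtain ⟨r, hr, hrj⟩ := List.mem_iff_getElem.mp hjP
        unfold stateL at hj2
        by_cases hk0 : kcn cs i = 0
        · rw [if_pos hk0] at hj2
          have hle : (oddPosL cs)[r] ≤ t := by
            rcases Nat.lt_or_ge r ((oddPosL cs).length - 1 - kcn cs i) with h2 | h2
            · exact le_of_lt (htg ▸ hmono r _ hr htlt h2)
            · have h3 : r = (oddPosL cs).length - 1 - kcn cs i := by omega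
              subst h3; rw [htg]
          omega
        · rw [if_neg hk0] at hj2
          have hmk : (oddPosL cs).length - kcn cs i < (oddPosL cs).length := by omega
          rw [List.getD_eq_getElem _ 0 hmk] at hj2
          rcases Nat.lt_or_ge r ((oddPosL cs).length - kcn cs i) with hcase | hcase
          · have hle : (oddPosL cs)[r] ≤ t := by
              rcases Nat.lt_or_ge r ((oddPosL cs).length - 1 - kcn cs i) with h2 | h2
              · exact le_of_lt (htg ▸ hmono r _ hr htlt h2)
              · have h3 : r = (oddPosL cs).length - 1 - kcn cs i := by omega
                subst h3; rw [htg]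
            omega
          · have hge : (oddPosL cs)[(oddPosL cs).length - kcn cs i]'hmk ≤ (oddPosL cs)[r] := by
              rcases Nat.lt_or_ge ((oddPosL cs).length - kcn cs i) r with h2 | h2
              · exact le_of_lt (hmono _ r hmk hr h2)
              · have h3 : (oddPosL cs).length - kcn cs i = r := by omega
                subst h3; rfl
            omega
      have hfind : roFindOdd cs x T.2 = (t : Int) := by
        rw [hl]
        exact roFindOdd_eq cs x hx t (stateL cs i) htn hot hsl_ge hsl_lt hmid
      rw [hfind] at hS
      have hset : S.1 = T.1.set t (String.ofList [cs.getD i ' ']) := by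
        rw [hS]; simp [PySem.List.pySetD_natCast]
      have kk : kcn cs (i + 1) = kcn cs i + 1 := by
        unfold kcn
        rw [countP_lt_succ, List.count_eq_one_of_mem (oddPosL_nodup cs) hmem]
      refine ⟨by rw [hset]; simp [hlen], ?_, ?_⟩
      · have hS2 : S.2 = (t : Int) - 1 := by rw [hS]
        rw [hS2]
        unfold stateL
        rw [kk, if_neg (by omega)]
        rw [show (oddPosL cs).length - (kcn cs i + 1) = (oddPosL cs).length - 1 - kcn cs i from by omega,
          ← ht]
      · intro j hj
        have hidxt : (oddPosL cs).idxOf t = (oddPosL cs).length - 1 - kcn cs i := by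
          rw [htg]
          exact List.Nodup.idxOf_getElem (oddPosL_nodup cs) _ _
        rw [hset, getD_set T.1 t j _ (by rw [hlen]; omega)]
        by_cases hjt : j = t
        · subst hjt
          rw [if_pos rfl]
          unfold stateVal
          rw [kk, if_pos hot, if_pos (by rw [hidxt]; omega), hidxt]
          rw [show (oddPosL cs).length - 1 - ((oddPosL cs).length - 1 - kcn cs i) = kcn cs i from by omega]
          have hPk : (oddPosL cs).getD (kcn cs i) 0 = i := by
            rw [← hki, List.getD_eq_getElem _ 0 (hki ▸ hkm)]
            exact List.getElem_idxOf (List.idxOf_lt_length_of_mem hmem)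
          rw [hPk]
        · rw [if_neg hjt, hval j hj]
          unfold stateVal
          rw [kk]
          by_cases hoj : oddb cs (cs.getD j ' ')
          · rw [if_pos hoj, if_pos hoj]
            have hjP : j ∈ oddPosL cs := (mem_oddPosL cs j).mpr ⟨hj, hoj⟩
            have hrj : (oddPosL cs).idxOf j < (oddPosL cs).length := List.idxOf_lt_length_of_mem hjP
            have hrne : (oddPosL cs).idxOf j ≠ (oddPosL cs).length - 1 - kcn cs i := by
              intro hcne
              apply hjt
              have hgj : (oddPosL cs).getD ((oddPosL cs).idxOf j) 0 = j := by
                rw [List.getD_eq_getElem _ 0 hrj]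
                exact List.getElem_idxOf hrj
              rw [hcne] at hgj
              exact (ht.trans hgj).symm
            by_cases hcond : (oddPosL cs).length - kcn cs i ≤ (oddPosL cs).idxOf j
            · rw [if_pos hcond, if_pos (by omega)]
            · rw [if_neg hcond, if_neg (by omega)]
          · rw [if_neg hoj, if_neg hoj]
            have hji : j ≠ i := by
              intro hc
              rw [hc] at hoj
              exact hoj ho
            simp [show (j < i + 1) ↔ (j < i) from by omega]

-- B's scatter loop, pointwise
lemma scatter_getD (P : List Nat) (V : List Char) (base : List Char)
    (hn : P.Nodup) (hlen : V.length = P.length) (hPn : ∀ p ∈ P, p < base.length) :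
    ((P.zip V).foldl (fun r pc => r.set pc.1 pc.2) base).length = base.length ∧
    (∀ j, j ∉ P → ((P.zip V).foldl (fun r pc => r.set pc.1 pc.2) base).getD j ' ' = base.getD j ' ') ∧
    (∀ r, r < P.length → ((P.zip V).foldl (fun r pc => r.set pc.1 pc.2) base).getD (P.getD r 0) ' ' = V.getD r ' ') := by
  induction P generalizing V base with
  | nil => simp
  | cons p T ih =>
    match V with
    | [] => simp at hlen
    | v :: W =>
      simp only [List.zip_cons_cons, List.foldl_cons]
      have hT : T.Nodup := hn.of_cons
      have hpT : p ∉ T := (List.nodup_cons.mp hn).1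
      have hW : W.length = T.length := by simpa using hlen
      have hp : p < base.length := hPn p (List.mem_cons_self)
      have hTn : ∀ q ∈ T, q < (base.set p v).length := by
        intro q hq; simp only [List.length_set]; exact hPn q (List.mem_cons_of_mem _ hq)
      obtain ⟨ihl, ihout, ihin⟩ := ih W (base.set p v) hT hW hTn
      refine ⟨by simp [ihl], ?_, ?_⟩
      · intro j hj
        rw [List.mem_cons, not_or] at hj
        rw [ihout j hj.2, getD_set_char base p j v hp]
        simp [hj.1]
      · intro r hr
        match r with
        | 0 =>
          simp only [List.getD_cons_zero]
          rw [ihout p hpT, getD_set_char base p p v hp]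
          simp
        | r + 1 =>
          simp only [List.getD_cons_succ]
          exact ihin r (by simpa using hr)

lemma join_singletons (l : List Char) :
    PySem.Str.join "" (l.map (fun c => String.ofList [c])) = String.ofList l := by
  apply String.toList_inj.mp
  simp [List.map_map]
  have h : (String.toList ∘ fun c => String.ofList [c]) = fun c => [c] := by
    funext c; simp
  rw [h, PySem.Chars.join_nil_singletons]

lemma kcn_full (cs : List Char) : kcn cs cs.length = (oddPosL cs).length := by
  unfold kcn
  rw [List.countP_eq_length]
  intro a ha
  simpa using ((mem_oddPosL cs a).mp ha).1

lemma A_eq_target (st : String) : reverseOddCount st = String.ofList (roTarget st.toList) := by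
  unfold reverseOddCount
  dsimp only
  set cs := st.toList with hcs
  rw [PySem.List.foldl_prod_mk (f := fun (d : PySem.Dict Char Int) (c : Char) => d.insert c (d.getD c 0 + 1))
    (g := fun (y : List String) (_ : Char) => y ++ [""])]
  set x := cs.foldl (fun (d : PySem.Dict Char Int) (c : Char) => d.insert c (d.getD c 0 + 1)) PySem.Dict.empty with hxd
  have hy0 : cs.foldl (fun (y : List String) (_ : Char) => y ++ [""]) [] = List.replicate cs.length "" := by
    rw [PySem.List.foldl_append_singleton_eq_map (f := fun _ => "")]
    simp [List.map_const']
  rw [hy0]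
  have hx : ∀ c, x.getD c 0 = (cs.count c : Int) := fun c => counter_getD cs c
  obtain ⟨hlen, _, hval⟩ := A_loop cs x hx cs.length (le_refl _) _ rfl
  have hfin : ((List.range cs.length).foldl (fun (q : List String × Int) (j : Nat) =>
      let c := PySem.List.pyGetD cs (j : Int) ' '
      if PySem.Int.mod (x.getD c 0) 2 == 0 then
        (PySem.List.pySetD q.1 (j : Int) (String.ofList [c]), q.2)
      else
        let l := roFindOdd cs x q.2
        (PySem.List.pySetD q.1 l (String.ofList [c]), l - 1))
      (List.replicate cs.length "", (cs.length : Int) - 1)).1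
      = (roTarget cs).map (fun c => String.ofList [c]) := by
    apply List.ext_getElem
    · rw [hlen]
      simp [roTarget]
    · intro j hj1 hj2
      have hjn : j < cs.length := by rwa [hlen] at hj1
      have hgd := hval j hjn
      rw [List.getD_eq_getElem _ _ hj1] at hgd
      rw [hgd]
      unfold stateVal roTarget
      rw [kcn_full]
      have hjr : j < ((List.range cs.length).map (fun j => if oddb cs (cs.getD j ' ') then
          cs.getD ((oddPosL cs).getD ((oddPosL cs).length - 1 - (oddPosL cs).idxOf j) 0) ' '
        else cs.getD j ' ')).length := by simpa using hjn
      rw [List.getElem_map, List.getElem_map, List.getElem_range]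
      by_cases ho : oddb cs (cs.getD j ' ')
      · rw [if_pos ho, if_pos ho, if_pos (by omega)]
      · rw [if_neg ho, if_neg ho, if_pos hjn]
  rw [hfin, join_singletons]

lemma B_eq_target (st : String) : reverseOddCount_alt st = String.ofList (roTarget st.toList) := by
  unfold reverseOddCount_alt
  dsimp only
  set cs := st.toList with hcs
  set cnt := cs.foldl (fun (d : PySem.Dict Char Int) ch => d.insert ch (d.getD ch 0 + 1)) PySem.Dict.empty with hcnt
  have hpos : ((List.range cs.length).filter
      (fun (i : Nat) => PySem.Int.mod (cnt.getD (PySem.List.pyGetD cs (i : Int) ' ') 0) 2 == 1)) = oddPosL cs := by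
    unfold oddPosL
    apply List.filter_congr
    intro i _
    rw [PySem.List.pyGetD_natCast, counter_getD, mod2_cast_eq_one]
    rfl
  rw [hpos]
  have hchars : (oddPosL cs).map (fun (i : Nat) => PySem.List.pyGetD cs (i : Int) ' ')
      = (oddPosL cs).map (fun i => cs.getD i ' ') := by
    apply List.map_congr_left
    intro i _
    rw [PySem.List.pyGetD_natCast]
  rw [hchars]
  have hfold : ∀ (z : List (Nat × Char)) (b : List Char),
      z.foldl (fun r pc => PySem.List.pySetD r (pc.1 : Int) pc.2) b
        = z.foldl (fun r pc => r.set pc.1 pc.2) b := by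
    intro z b
    simp only [PySem.List.pySetD_natCast]
  rw [hfold]
  have hallP : ∀ q ∈ oddPosL cs, q < cs.length := fun q hq => ((mem_oddPosL cs q).mp hq).1
  have hlenV : (((oddPosL cs).map (fun i => cs.getD i ' ')).reverse).length = (oddPosL cs).length := by
    simp
  obtain ⟨hRlen, hout, hin⟩ := scatter_getD (oddPosL cs)
    (((oddPosL cs).map (fun i => cs.getD i ' ')).reverse) cs (oddPosL_nodup cs) hlenV hallP
  congr 1
  apply List.ext_getElem
  · rw [hRlen]; simp [roTarget]
  · intro j hj1 hj2
    have hjn : j < cs.length := by rwa [hRlen] at hj1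
    rw [← List.getD_eq_getElem _ ' ' hj1]
    unfold roTarget
    have hjr : j < (List.range cs.length).length := by simpa using hjn
    rw [List.getElem_map, List.getElem_range]
    by_cases ho : oddb cs (cs.getD j ' ')
    · rw [if_pos ho]
      have hjP : j ∈ oddPosL cs := (mem_oddPosL cs j).mpr ⟨hjn, ho⟩
      have hr : (oddPosL cs).idxOf j < (oddPosL cs).length := List.idxOf_lt_length_of_mem hjP
      have hPj : (oddPosL cs).getD ((oddPosL cs).idxOf j) 0 = j := by
        rw [List.getD_eq_getElem _ 0 hr]
        exact List.getElem_idxOf hr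
      have := hin ((oddPosL cs).idxOf j) hr
      rw [hPj] at this
      rw [this]
      have hrev : (((oddPosL cs).map (fun i => cs.getD i ' ')).reverse).getD ((oddPosL cs).idxOf j) ' '
          = ((oddPosL cs).map (fun i => cs.getD i ' ')).getD ((oddPosL cs).length - 1 - (oddPosL cs).idxOf j) ' ' := by
        rw [List.getD_eq_getElem _ ' ' (by simpa using hr),
            List.getD_eq_getElem _ ' ' (by simp; omega), List.getElem_reverse]
        simp
      rw [hrev, List.getD_eq_getElem _ ' ' (by simp; omega), List.getElem_map,
          ← List.getD_eq_getElem _ 0 (by omega)]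
    · rw [if_neg ho]
      have hjP : j ∉ oddPosL cs := fun hm => ho ((mem_oddPosL cs j).mp hm).2
      rw [hout j hjP]

-- ===== VERDICT (by name: the statement is the Claim_ definition above) =====
theorem reverseOddCount_spec : Claim_equal_reverseOddCount := by
  intro st _
  unfold Spec_reverseOddCount
  rw [A_eq_target, B_eq_target]
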